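-- pv_equiv track=rewrite | github.com/Hummer12007/labs-is | pacman/Станіслав Безкоровайний/pacman/bfs.py | nearby_ghosts
-- ===== SOURCE A (Python) =====
-- def nearby_ghosts(grid, x, y):
--     for i in range(-1,2):
--         for j in range(-1,2):
--             r = i + x
--             c = j + y
--             if r >= 0 and r < len(grid) and c >= 0 and c < len(grid[0]) and grid[r][c] == 'G':
--                 return True
--
--     return False
-- ===== SOURCE B (Python) =====
-- def nearby_ghosts(grid, x, y):
--     if x < -1 or y < -1:
--         return False
--     for row in grid[max(0, x - 1):x + 2]:
--         if 'G' in row[max(0, y - 1):y + 2]: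
--             return True
--     return False
-- ===== Notes on version B (the rewrite author's own statement) =====
-- stated objective: simpler
-- what changed: Replaces the 9-iteration offset double-loop with per-cell bounds checks by slicing the 3x3 neighborhood out of the grid (a negativity guard plus clamped row/column slices) and testing 'G' membership per sliced row.
-- outside the precondition, e.g. on nearby_ghosts([['.'], ['.', 'G']], 0, 1): A returns False, B returns True; on nearby_ghosts([['.', '.'], ['.']], 1, 1): A raises IndexError, B returns False
import Mathlib
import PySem

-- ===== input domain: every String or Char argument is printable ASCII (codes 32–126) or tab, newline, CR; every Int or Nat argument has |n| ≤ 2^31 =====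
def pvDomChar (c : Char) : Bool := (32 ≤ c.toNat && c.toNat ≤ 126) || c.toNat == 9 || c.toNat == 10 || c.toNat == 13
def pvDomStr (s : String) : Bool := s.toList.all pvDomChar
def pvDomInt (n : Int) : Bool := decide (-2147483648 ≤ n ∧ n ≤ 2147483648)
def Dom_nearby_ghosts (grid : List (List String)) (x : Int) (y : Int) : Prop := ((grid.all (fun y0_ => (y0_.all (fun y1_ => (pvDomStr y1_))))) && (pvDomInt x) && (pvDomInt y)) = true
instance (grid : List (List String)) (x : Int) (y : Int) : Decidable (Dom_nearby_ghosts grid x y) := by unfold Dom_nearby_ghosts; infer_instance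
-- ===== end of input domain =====

-- B replaces the 9-cell offset double-loop and its per-cell bounds checks by row/column
-- slicing with Python's clamping (objective: simpler, same behaviour on rectangular grids).

-- ===== PORT A =====
-- Literal port of A: for i in range(-1,2): for j in range(-1,2): check the guarded cell.
-- grid[0] is read only after 0 ≤ r < len(grid) held (so grid ≠ []); headD [] renders it totally.
def nearby_ghosts (grid : List (List String)) (x : Int) (y : Int) : Bool :=
  (PySem.List.pyRange (-1) 2 1).any (fun i =>
    (PySem.List.pyRange (-1) 2 1).any (fun j =>
      let r := i + x
      let c := j + y
      decide (0 ≤ r) && decide (r < (grid.length : Int)) &&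
      decide (0 ≤ c) && decide (c < ((grid.headD []).length : Int)) &&
      (PySem.List.pyGet? ((PySem.List.pyGet? grid r).getD []) c == some "G")))

-- ===== PORT B =====
def nearby_ghosts_alt (grid : List (List String)) (x : Int) (y : Int) : Bool :=
  if x < -1 || y < -1 then false
  else
    (PySem.List.slice grid (some (max 0 (x - 1))) (some (x + 2))).any (fun row =>
      (PySem.List.slice row (some (max 0 (y - 1))) (some (y + 2))).contains "G")

-- ===== PRECONDITION & SPEC =====
-- Pre_ excludes ragged-grid corner cases inside the 3x3 window: A bounds every row's column
-- scan by the FIRST row's length (an artefact), so it raises IndexError on a window cell a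
-- short row lacks, and ignores a "G" a long row has beyond that width while B sees it.
def Pre_nearby_ghosts (grid : List (List String)) (x : Int) (y : Int) : Prop :=
  ∀ r : Nat, r < grid.length → x - 1 ≤ (r : Int) → (r : Int) ≤ x + 1 →
    (∀ c : Nat, c < (grid.headD []).length → y - 1 ≤ (c : Int) → (c : Int) ≤ y + 1 →
        c < (grid.getD r []).length) ∧
    (∀ c : Nat, c < (grid.getD r []).length → (grid.headD []).length ≤ c →
        y - 1 ≤ (c : Int) → (c : Int) ≤ y + 1 → (grid.getD r []).getD c "" ≠ "G")
instance (grid : List (List String)) (x : Int) (y : Int) : Decidable (Pre_nearby_ghosts grid x y) := by unfold Pre_nearby_ghosts; exact Nat.decidableBallLT _ _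

def pvWitness_nearby_ghosts : List (List String) × Int × Int := ([[".", "G"], [".", "."]], 0, 0)

def Spec_nearby_ghosts (grid : List (List String)) (x : Int) (y : Int) (out : Bool) : Prop := out = nearby_ghosts_alt grid x y
instance (grid : List (List String)) (x : Int) (y : Int) (out : Bool) : Decidable (Spec_nearby_ghosts grid x y out) := by unfold Spec_nearby_ghosts; infer_instance

-- ===== CLAIM (what is proved, stated in full; the proofs are below) =====
def Claim_equal_nearby_ghosts : Prop := ∀ (grid : List (List String)) (x : Int) (y : Int), Dom_nearby_ghosts grid x y → Pre_nearby_ghosts grid x y → Spec_nearby_ghosts grid x y (nearby_ghosts grid x y)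

-- ===== LEMMAS AND PROOFS =====

-- common characterisation: some cell of the 3×3 neighbourhood of (x,y) inside the grid is "G"
def ghostAt (grid : List (List String)) (x : Int) (y : Int) : Prop :=
  ∃ r : Nat, ∃ _ : r < grid.length, ∃ c : Nat,
    c < (grid.headD []).length ∧
    x - 1 ≤ (r : Int) ∧ (r : Int) ≤ x + 1 ∧
    y - 1 ≤ (c : Int) ∧ (c : Int) ≤ y + 1 ∧
    (grid.getD r []).getD c "" = "G"

lemma any_drop_take {α : Type} (d : α) (xs : List α) (a n : Nat) (p : α → Bool) :
    ((xs.drop a).take n).any p = true ↔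
      ∃ k : Nat, k < xs.length ∧ a ≤ k ∧ k < a + n ∧ p (xs.getD k d) = true := by
  simp only [List.any_eq_true]
  constructor
  · rintro ⟨v, hv, hp⟩
    rw [List.mem_iff_getElem] at hv
    obtain ⟨i, hi, hev⟩ := hv
    have hlen : i < n ∧ a + i < xs.length := by
      simp [List.length_take, List.length_drop] at hi
      omega
    refine ⟨a + i, hlen.2, by omega, by omega, ?_⟩
    have : ((xs.drop a).take n)[i] = xs[a + i] := by
      rw [List.getElem_take, List.getElem_drop]
    rw [List.getD_eq_getElem _ _ hlen.2, ← this, hev]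
    exact hp
  · rintro ⟨k, hk, hak, hkn, hp⟩
    refine ⟨xs.getD k d, ?_, hp⟩
    rw [List.mem_iff_getElem]
    have h1 : k - a < ((xs.drop a).take n).length := by
      simp [List.length_take, List.length_drop]; omega
    refine ⟨k - a, h1, ?_⟩
    have : ((xs.drop a).take n)[k - a] = xs[a + (k - a)] := by
      rw [List.getElem_take, List.getElem_drop]
    rw [this, List.getD_eq_getElem _ _ hk]
    congr 1
    omega

lemma alt_iff (grid : List (List String)) (x y : Int)
    (hPre : Pre_nearby_ghosts grid x y) :
    nearby_ghosts_alt grid x y = true ↔ ghostAt grid x y := by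
  unfold nearby_ghosts_alt
  split_ifs with hg
  · simp only [false_iff]
    rintro ⟨r, hr, c, hc, h1, h2, h3, h4, _⟩
    simp only [Bool.or_eq_true, decide_eq_true_eq] at hg
    rcases hg with hg | hg <;> omega
  · simp only [Bool.or_eq_true, decide_eq_true_eq, not_or] at hg
    obtain ⟨hx, hy⟩ := hg
    rw [PySem.List.slice_toNat _ (le_max_left _ _) (by omega)]
    rw [any_drop_take ([] : List String)]
    constructor
    · rintro ⟨k, hk, hk1, hk2, hrow⟩
      obtain ⟨p1, p2⟩ := hPre k hk (by omega) (by omega)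
      rw [PySem.List.slice_toNat _ (le_max_left _ _) (by omega)] at hrow
      simp only [List.contains_eq_any_beq] at hrow
      rw [any_drop_take ""] at hrow
      obtain ⟨c, hc, hc1, hc2, hcele⟩ := hrow
      have hcg : (grid.getD k []).getD c "" = "G" := (eq_of_beq hcele).symm
      by_cases hcW : c < (grid.headD []).length
      · exact ⟨k, hk, c, hcW, by omega, by omega, by omega, by omega, hcg⟩
      · exact absurd hcg (p2 c hc (by omega) (by omega) (by omega))
    · rintro ⟨r, hr, c, hc, h1, h2, h3, h4, hcg⟩
      obtain ⟨p1, p2⟩ := hPre r hr (by omega) (by omega)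
      have hclen : c < (grid.getD r []).length := p1 c hc (by omega) (by omega)
      refine ⟨r, hr, by omega, by omega, ?_⟩
      rw [PySem.List.slice_toNat _ (le_max_left _ _) (by omega)]
      simp only [List.contains_eq_any_beq]
      rw [any_drop_take ""]
      exact ⟨c, hclen, by omega, by omega, by rw [hcg]; exact beq_self_eq_true _⟩

lemma a_iff (grid : List (List String)) (x y : Int)
    (hPre : Pre_nearby_ghosts grid x y) :
    nearby_ghosts grid x y = true ↔ ghostAt grid x y := by
  unfold nearby_ghosts
  have hrange : PySem.List.pyRange (-1) 2 1 = [-1, 0, 1] := by decide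
  rw [hrange]
  simp only [List.any_eq_true, Bool.and_eq_true, decide_eq_true_eq, beq_iff_eq]
  constructor
  · rintro ⟨i, hi, j, hj, ⟨⟨⟨h0r, h1r⟩, h0c⟩, h1c⟩, hget⟩
    simp only [List.mem_cons, List.not_mem_nil, or_false] at hi hj
    have hg1 : PySem.List.pyGet? grid (i + x) = some (grid[(i + x).toNat]'(by omega)) :=
      PySem.List.pyGet?_eq_some_getElem _ h0r h1r
    rw [hg1] at hget
    simp only [Option.getD_some] at hget
    obtain ⟨p1, p2⟩ := hPre (i + x).toNat (by omega) (by omega) (by omega)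
    rw [List.getD_eq_getElem _ _ (by omega : (i + x).toNat < grid.length)] at p1
    have hjlen : (j + y).toNat < (grid[(i + x).toNat]'(by omega)).length :=
      p1 (j + y).toNat (by omega) (by omega) (by omega)
    have hg2 : PySem.List.pyGet? (grid[(i + x).toNat]'(by omega)) (j + y) =
        some ((grid[(i + x).toNat]'(by omega))[(j + y).toNat]'(by omega)) :=
      PySem.List.pyGet?_eq_some_getElem _ h0c (by omega)
    rw [hg2, Option.some_inj] at hget
    refine ⟨(i + x).toNat, by omega, (j + y).toNat, by omega, by omega, by omega, by omega, by omega, ?_⟩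
    rw [List.getD_eq_getElem _ _ (by omega : (i + x).toNat < grid.length),
        List.getD_eq_getElem _ _ (by omega : (j + y).toNat < _)]
    exact hget
  · rintro ⟨r, hr, c, hc, h1, h2, h3, h4, hcg⟩
    obtain ⟨p1, p2⟩ := hPre r hr (by omega) (by omega)
    have hclen : c < (grid.getD r []).length := p1 c hc (by omega) (by omega)
    rw [List.getD_eq_getElem _ _ hr] at hclen
    refine ⟨(r : Int) - x, ?_, (c : Int) - y, ?_, ⟨⟨⟨by omega, by omega⟩, by omega⟩, by omega⟩, ?_⟩
    · simp only [List.mem_cons, List.not_mem_nil, or_false]; omega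
    · simp only [List.mem_cons, List.not_mem_nil, or_false]; omega
    · rw [List.getD_eq_getElem _ _ hr] at hcg
      have hrx : (r : Int) - x + x = (r : Int) := by ring
      have hcy : (c : Int) - y + y = (c : Int) := by ring
      rw [hrx, hcy, PySem.List.pyGet?_natCast grid, List.getElem?_eq_getElem hr]
      simp only [Option.getD_some]
      rw [PySem.List.pyGet?_natCast, List.getElem?_eq_getElem hclen]
      rw [Option.some_inj]
      rw [List.getD_eq_getElem _ _ hclen] at hcg
      exact hcg

-- ===== VERDICT (by name: the statement is the Claim_ definition above) =====
theorem nearby_ghosts_spec : Claim_equal_nearby_ghosts := by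
  intro grid x y _ hPre
  unfold Spec_nearby_ghosts
  have := (a_iff grid x y hPre).trans (alt_iff grid x y hPre).symm
  exact Bool.coe_iff_coe.mp this
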